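-- pv_equiv track=rewrite | github.com/abhijeet1069/CompetitiveCoding | incSubarray.py | maxArr
-- ===== SOURCE A (Python) =====
-- def maxArr(arr):
--     res = []
--     count = 0
--     for i in range(len(arr)-1):
--         if(arr[i] < arr[i+1]):
--             count+=1
--
--         else:
--             if(count != 0):
--                 res.append(count+1)
--                 count = 0
--     if(count != 0):
--         res.append(count+1)
--     return res
-- ===== SOURCE B (Python) =====
-- def maxArr(arr):
--     n = len(arr)
--     boundaries = [-1] + [i for i in range(n - 1) if arr[i] >= arr[i + 1]] + [n - 1]
--     res = []
--     for j in range(len(boundaries) - 1):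
--         length = boundaries[j + 1] - boundaries[j]
--         if length >= 2:
--             res.append(length)
--     return res
-- ===== Notes on version B (the rewrite author's own statement) =====
-- stated objective: alternative
-- what changed: Replaces A's single count-and-flush scan (incremental counter flushed in-loop and after the loop) with an explicit boundary table ([-1] + break positions + [n-1]) followed by a second pass that emits each consecutive-boundary difference >= 2 as a segment length.
import Mathlib
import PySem

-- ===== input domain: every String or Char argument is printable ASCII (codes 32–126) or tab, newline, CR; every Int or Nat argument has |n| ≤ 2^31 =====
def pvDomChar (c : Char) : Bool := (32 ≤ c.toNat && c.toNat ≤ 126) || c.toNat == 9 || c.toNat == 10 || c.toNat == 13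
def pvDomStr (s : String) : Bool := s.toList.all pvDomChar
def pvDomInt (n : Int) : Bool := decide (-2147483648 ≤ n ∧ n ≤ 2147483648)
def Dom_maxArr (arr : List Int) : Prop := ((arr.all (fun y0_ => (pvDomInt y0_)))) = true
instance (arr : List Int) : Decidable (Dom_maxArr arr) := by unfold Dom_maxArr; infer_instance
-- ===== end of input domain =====

-- B replaces A's incremental count-and-flush scan by an explicit boundary table
-- (break positions with sentinels) followed by a segment-length pass; objective: alternative.

-- ===== PORT A =====
-- literal transliteration of Source A: index loop with state (res, count); pyGetD is exact
-- here because every index used is in range 0..len-1.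
def maxArr (arr : List Int) : List Int :=
  let st := (PySem.List.pyRange 0 (PySem.List.len arr - 1)).foldl
    (fun (st : List Int × Int) i =>
      if PySem.List.pyGetD arr i 0 < PySem.List.pyGetD arr (i + 1) 0 then
        (st.1, st.2 + 1)
      else if st.2 ≠ 0 then (st.1 ++ [st.2 + 1], 0) else st)
    ([], 0)
  if st.2 ≠ 0 then st.1 ++ [st.2 + 1] else st.1

-- ===== PORT B =====
-- literal transliteration of Source B: boundaries = [-1] ++ break positions ++ [n-1],
-- then a pass over consecutive boundary pairs keeping differences ≥ 2.
def maxArr_alt (arr : List Int) : List Int :=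
  let n := PySem.List.len arr
  let boundaries :=
    [(-1 : Int)] ++
      (PySem.List.pyRange 0 (n - 1)).filter
        (fun i => PySem.List.pyGetD arr (i + 1) 0 ≤ PySem.List.pyGetD arr i 0) ++
      [n - 1]
  (PySem.List.pyRange 0 (PySem.List.len boundaries - 1)).foldl
    (fun res j =>
      let length := PySem.List.pyGetD boundaries (j + 1) 0 - PySem.List.pyGetD boundaries j 0
      if 2 ≤ length then res ++ [length] else res)
    []

-- ===== PRECONDITION & SPEC =====
def Spec_maxArr (arr : List Int) (out : List Int) : Prop := out = maxArr_alt arr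
instance (arr : List Int) (out : List Int) : Decidable (Spec_maxArr arr out) := by unfold Spec_maxArr; infer_instance

-- ===== CLAIM (what is proved, stated in full; the proofs are below) =====
def Claim_equal_maxArr : Prop := ∀ (arr : List Int), Dom_maxArr arr → Spec_maxArr arr (maxArr arr)

-- ===== LEMMAS AND PROOFS =====

-- Common intermediate: both programs are functions of the consecutive-pairs list Q = arr.zip arr.tail.

-- the run lengths A produces, as a structural recursion over the pairs list with pending count c
def pvRuns : List (Int × Int) → Int → List Int
  | [], c => if c ≠ 0 then [c + 1] else []
  | q :: Q, c =>
    if q.1 < q.2 then pvRuns Q (c + 1)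
    else if c ≠ 0 then (c + 1) :: pvRuns Q 0 else pvRuns Q 0

-- positions (starting at s) of the non-increasing adjacent pairs
def pvFalsePos : List (Int × Int) → Int → List Int
  | [], _ => []
  | q :: Q, s => if q.1 < q.2 then pvFalsePos Q (s + 1) else s :: pvFalsePos Q (s + 1)

-- B's segment pass over the boundary list, with previous boundary p
def pvSeg : Int → List Int → List Int
  | _, [] => []
  | p, q :: qs => if 2 ≤ q - p then (q - p) :: pvSeg q qs else pvSeg q qs

-- A's fold + final flush computes pvRuns
lemma foldA_runs (Q : List (Int × Int)) : ∀ (res : List Int) (c : Int),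
    (let st := Q.foldl
        (fun (st : List Int × Int) q =>
          if q.1 < q.2 then (st.1, st.2 + 1)
          else if st.2 ≠ 0 then (st.1 ++ [st.2 + 1], 0) else st)
        (res, c);
      if st.2 ≠ 0 then st.1 ++ [st.2 + 1] else st.1) = res ++ pvRuns Q c := by
  induction Q with
  | nil =>
    intro res c
    show (if c ≠ 0 then res ++ [c + 1] else res) = res ++ pvRuns [] c
    simp only [pvRuns]
    split_ifs <;> simp
  | cons q Q ih =>
    intro res c
    rw [List.foldl_cons]
    dsimp only
    by_cases h1 : q.1 < q.2
    · rw [if_pos h1]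
      rw [show pvRuns (q :: Q) c = pvRuns Q (c + 1) from by
        simp only [pvRuns]; rw [if_pos h1]]
      exact ih res (c + 1)
    · rw [if_neg h1]
      by_cases h2 : c ≠ 0
      · rw [if_pos h2]
        rw [show pvRuns (q :: Q) c = (c + 1) :: pvRuns Q 0 from by
          simp only [pvRuns]; rw [if_neg h1, if_pos h2]]
        refine (ih (res ++ [c + 1]) 0).trans ?_
        simp
      · rw [if_neg h2]
        rw [show pvRuns (q :: Q) c = pvRuns Q 0 from by
          simp only [pvRuns]; rw [if_neg h1, if_neg h2]]
        simp only [not_not] at h2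
        subst h2
        exact ih res 0

-- the filtered index range computes pvFalsePos
lemma rangeFilter (Q : List (Int × Int)) :
    ∀ (s : Int),
      ((List.range Q.length).filter
          (fun k => !decide ((Q.getD k (0, 0)).1 < (Q.getD k (0, 0)).2))).map
          (fun (k : Nat) => s + (k : Int)) = pvFalsePos Q s := by
  induction Q with
  | nil => intro s; simp [pvFalsePos]
  | cons q Q ih =>
    intro s
    have pcomp : ((fun k => !decide (((q :: Q).getD k ((0 : Int), (0 : Int))).1
          < ((q :: Q).getD k (0, 0)).2)) ∘ Nat.succ)
        = (fun k => !decide ((Q.getD k ((0 : Int), (0 : Int))).1 < (Q.getD k (0, 0)).2)) := by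
      funext k
      simp [List.getD_cons_succ]
    have mcomp : ((fun (k : Nat) => s + (k : Int)) ∘ Nat.succ)
        = (fun (k : Nat) => (s + 1) + (k : Int)) := by
      funext k
      simp only [Function.comp_apply]
      push_cast [Nat.succ_eq_add_one]
      ring
    simp only [List.length_cons, List.range_succ_eq_map, pvFalsePos]
    rw [List.filter_cons]
    by_cases h1 : q.1 < q.2
    · rw [if_pos h1]
      rw [show (!decide (((q :: Q).getD 0 ((0 : Int), (0 : Int))).1
          < ((q :: Q).getD 0 (0, 0)).2)) = false from by simp [h1]]
      simp only [Bool.false_eq_true, if_false]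
      rw [List.filter_map, List.map_map, pcomp, mcomp]
      exact ih (s + 1)
    · rw [if_neg h1]
      rw [show (!decide (((q :: Q).getD 0 ((0 : Int), (0 : Int))).1
          < ((q :: Q).getD 0 (0, 0)).2)) = true from by simp [h1]]
      rw [if_pos (show (true : Bool) = true from rfl)]
      rw [List.map_cons]
      rw [show s + ((0 : Nat) : Int) = s from by simp]
      rw [List.filter_map, List.map_map, pcomp, mcomp, ih (s + 1)]

-- B's pair fold over the boundary list computes pvSeg
lemma segFold (qs : List Int) : ∀ (p : Int) (res : List Int),
    ((p :: qs).zip qs).foldl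
        (fun res uv => if 2 ≤ uv.2 - uv.1 then res ++ [uv.2 - uv.1] else res) res
      = res ++ pvSeg p qs := by
  induction qs with
  | nil => intro p res; simp [pvSeg]
  | cons q qs ih =>
    intro p res
    simp only [List.zip_cons_cons, List.foldl_cons, pvSeg]
    by_cases h : 2 ≤ q - p
    · simp [h, ih]
    · simp [h, ih]

-- core: the segment pass over sentinel + break positions + sentinel equals pvRuns
lemma seg_runs (Q : List (Int × Int)) : ∀ (s p : Int), p < s →
    pvSeg p (pvFalsePos Q s ++ [s + (Q.length : Int)]) = pvRuns Q (s - p - 1) := by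
  induction Q with
  | nil =>
    intro s p hp
    simp only [pvFalsePos, List.nil_append, List.length_nil, Nat.cast_zero, add_zero,
      pvSeg, pvRuns]
    by_cases h : 2 ≤ s - p
    · rw [if_pos h, if_pos (show s - p - 1 ≠ 0 by omega)]
      congr 1
      omega
    · rw [if_neg h, if_neg (show ¬s - p - 1 ≠ 0 by omega)]
  | cons q Q ih =>
    intro s p hp
    simp only [pvFalsePos, List.length_cons, pvRuns]
    by_cases h1 : q.1 < q.2
    · rw [if_pos h1, if_pos h1,
        show s + ((Q.length + 1 : Nat) : Int) = (s + 1) + (Q.length : Int) by push_cast; ring,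
        ih (s + 1) p (by omega)]
      congr 1
      omega
    · rw [if_neg h1, if_neg h1, List.cons_append]
      simp only [pvSeg]
      rw [show s + ((Q.length + 1 : Nat) : Int) = (s + 1) + (Q.length : Int) by push_cast; ring,
        ih (s + 1) s (by omega),
        show s + 1 - s - 1 = (0 : Int) from by omega]
      by_cases h2 : 2 ≤ s - p
      · rw [if_pos h2, if_pos (show s - p - 1 ≠ 0 by omega)]
        congr 2
        omega
      · rw [if_neg h2, if_neg (show ¬s - p - 1 ≠ 0 by omega)]

-- reading the pairs list (x :: xs).zip xs at a valid index gives the two adjacent reads of A/B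
lemma pairGet {α : Type} (x : α) (xs : List α) (d : α) (j : Int) (h0 : 0 ≤ j)
    (h1 : j < (((x :: xs).zip xs).length : Int)) :
    PySem.List.pyGetD ((x :: xs).zip xs) j (d, d)
      = (PySem.List.pyGetD (x :: xs) j d, PySem.List.pyGetD (x :: xs) (j + 1) d) := by
  obtain ⟨k, rfl, hk⟩ : ∃ k : Nat, j = (k : Int) ∧ k < ((x :: xs).zip xs).length :=
    ⟨j.toNat, by omega, by omega⟩
  have hkx : k < xs.length := by simpa [List.length_zip] using hk
  rw [show (k : Int) + 1 = ((k + 1 : Nat) : Int) by push_cast; ring]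
  rw [PySem.List.pyGetD_natCast, PySem.List.pyGetD_natCast, PySem.List.pyGetD_natCast]
  rw [List.getD_eq_getElem _ _ hk,
    List.getD_eq_getElem _ _ (show k < (x :: xs).length by simp; omega),
    List.getD_eq_getElem _ _ (show k + 1 < (x :: xs).length by simp; omega)]
  rw [List.getElem_zip]
  simp

-- main equality, unconditional
lemma maxArr_eq_alt (arr : List Int) : maxArr arr = maxArr_alt arr := by
  match arr with
  | [] => decide
  | x :: xs =>
    have hQ : ((((x :: xs).zip xs).length : Nat) : Int) = ((xs.length : Nat) : Int) := by
      simp [List.length_zip]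
    have hlen : PySem.List.len (x :: xs) - 1 = PySem.List.len ((x :: xs).zip xs) := by
      rw [PySem.List.len_eq, PySem.List.len_eq, hQ]
      simp only [List.length_cons]
      push_cast
      ring
    -- A side
    have hA : maxArr (x :: xs) = pvRuns ((x :: xs).zip xs) 0 := by
      have e1 : maxArr (x :: xs) =
          (fun st : List Int × Int => if st.2 ≠ 0 then st.1 ++ [st.2 + 1] else st.1)
            ((PySem.List.pyRange 0 (PySem.List.len (x :: xs) - 1)).foldl
              (fun (st : List Int × Int) i =>
                if PySem.List.pyGetD (x :: xs) i 0 < PySem.List.pyGetD (x :: xs) (i + 1) 0 then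
                  (st.1, st.2 + 1)
                else if st.2 ≠ 0 then (st.1 ++ [st.2 + 1], 0) else st) ([], 0)) := rfl
      rw [e1]
      rw [hlen]
      rw [PySem.List.foldl_congr_mem _ _
        (fun (st : List Int × Int) j =>
          (fun (st : List Int × Int) (q : Int × Int) =>
            if q.1 < q.2 then (st.1, st.2 + 1)
            else if st.2 ≠ 0 then (st.1 ++ [st.2 + 1], 0) else st) st
            (PySem.List.pyGetD ((x :: xs).zip xs) j (0, 0))) _
        (by
          intro acc j hj
          rw [PySem.List.mem_pyRange_one] at hj
          simp only [pairGet x xs 0 j hj.1 (by simpa [PySem.List.len_eq] using hj.2)])]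
      rw [PySem.List.foldl_pyRange_zero_pyGetD ((x :: xs).zip xs) ((0 : Int), (0 : Int))
        (fun (st : List Int × Int) (q : Int × Int) =>
          if q.1 < q.2 then (st.1, st.2 + 1)
          else if st.2 ≠ 0 then (st.1 ++ [st.2 + 1], 0) else st) ([], 0)]
      simpa using foldA_runs ((x :: xs).zip xs) [] 0
    -- B side: the break positions are pvFalsePos
    have hBrk : (PySem.List.pyRange 0 (PySem.List.len (x :: xs) - 1)).filter
        (fun i => decide (PySem.List.pyGetD (x :: xs) (i + 1) 0 ≤ PySem.List.pyGetD (x :: xs) i 0))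
        = pvFalsePos ((x :: xs).zip xs) 0 := by
      rw [hlen, PySem.List.len_eq, PySem.List.pyRange_zero_nat, List.filter_map]
      rw [List.filter_congr (q := fun k =>
          !decide ((((x :: xs).zip xs).getD k (0, 0)).1 < (((x :: xs).zip xs).getD k (0, 0)).2))
        (by
          intro k hk
          rw [List.mem_range] at hk
          have hp := pairGet x xs 0 (k : Int) (by positivity) (by exact_mod_cast hk)
          rw [PySem.List.pyGetD_natCast] at hp
          simp only [Function.comp_apply, hp]
          rw [show (k : Int) + 1 = ((k + 1 : Nat) : Int) by push_cast; ring]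
          simp only [← decide_not, decide_eq_decide, not_lt])]
      have hrf := rangeFilter ((x :: xs).zip xs) 0
      rw [show (fun (k : Nat) => (0 : Int) + (k : Int)) = (fun (k : Nat) => ((k : Nat) : Int)) from by
        funext k; simp] at hrf
      exact hrf
    -- B side: whole program
    have hB : maxArr_alt (x :: xs) = pvRuns ((x :: xs).zip xs) 0 := by
      show (PySem.List.pyRange 0 (PySem.List.len
          ([(-1 : Int)] ++ (PySem.List.pyRange 0 (PySem.List.len (x :: xs) - 1)).filter
            (fun i => decide (PySem.List.pyGetD (x :: xs) (i + 1) 0 ≤ PySem.List.pyGetD (x :: xs) i 0)) ++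
            [PySem.List.len (x :: xs) - 1]) - 1)).foldl _ [] = _
      rw [hBrk, hlen, PySem.List.len_eq ((x :: xs).zip xs), hQ]
      rw [show [(-1 : Int)] ++ pvFalsePos ((x :: xs).zip xs) 0 ++ [((xs.length : Nat) : Int)]
          = (-1 : Int) :: (pvFalsePos ((x :: xs).zip xs) 0 ++ [((xs.length : Nat) : Int)]) from by
        simp]
      have hlen2 : PySem.List.len ((-1 : Int) :: (pvFalsePos ((x :: xs).zip xs) 0 ++ [((xs.length : Nat) : Int)])) - 1
          = PySem.List.len (((-1 : Int) :: (pvFalsePos ((x :: xs).zip xs) 0 ++ [((xs.length : Nat) : Int)])).zip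
              (pvFalsePos ((x :: xs).zip xs) 0 ++ [((xs.length : Nat) : Int)])) := by
        rw [PySem.List.len_eq, PySem.List.len_eq]
        simp [List.length_zip]
      rw [hlen2]
      rw [PySem.List.foldl_congr_mem _ _
        (fun (res : List Int) j =>
          (fun (res : List Int) (uv : Int × Int) =>
            if 2 ≤ uv.2 - uv.1 then res ++ [uv.2 - uv.1] else res) res
            (PySem.List.pyGetD
              (((-1 : Int) :: (pvFalsePos ((x :: xs).zip xs) 0 ++ [((xs.length : Nat) : Int)])).zip
                (pvFalsePos ((x :: xs).zip xs) 0 ++ [((xs.length : Nat) : Int)])) j (0, 0))) _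
        (by
          intro acc j hj
          rw [PySem.List.mem_pyRange_one] at hj
          have hp := pairGet (-1 : Int) (pvFalsePos ((x :: xs).zip xs) 0 ++ [((xs.length : Nat) : Int)]) 0 j
            hj.1 (by simpa [PySem.List.len_eq] using hj.2)
          simp only [hp])]
      rw [PySem.List.foldl_pyRange_zero_pyGetD
        (((-1 : Int) :: (pvFalsePos ((x :: xs).zip xs) 0 ++ [((xs.length : Nat) : Int)])).zip
          (pvFalsePos ((x :: xs).zip xs) 0 ++ [((xs.length : Nat) : Int)])) ((0 : Int), (0 : Int))
        (fun (res : List Int) (uv : Int × Int) =>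
          if 2 ≤ uv.2 - uv.1 then res ++ [uv.2 - uv.1] else res) []]
      rw [segFold (pvFalsePos ((x :: xs).zip xs) 0 ++ [((xs.length : Nat) : Int)]) (-1) []]
      rw [List.nil_append]
      have hs := seg_runs ((x :: xs).zip xs) 0 (-1) (by omega)
      rw [show (0 : Int) + ((((x :: xs).zip xs).length : Nat) : Int) = ((xs.length : Nat) : Int) from by
        rw [hQ]; ring] at hs
      rw [hs]
      norm_num
    rw [hA, hB]

-- ===== VERDICT (by name: the statement is the Claim_ definition above) =====
theorem maxArr_spec : Claim_equal_maxArr := by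
  intro arr _
  unfold Spec_maxArr
  exact maxArr_eq_alt arr
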